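-- pv_equiv track=rewrite | github.com/MaryannXu/576FinalProject | recombine_translate.py | get_factor_pairs
-- ===== SOURCE A (Python) =====
-- import math
-- from typing import List, Dict, Tuple, Set, Optional
--
-- def get_factor_pairs(n: int) -> List[Tuple[int, int]]:
--     """
--     Find all factor pairs (r, c) such that r * c = n.
--     Returns list of tuples, e.g. for 20: [(4, 5), (5, 4), (2, 10), (10, 2)...]
--     Sorted by 'squareness' (aspect ratio closer to 1 first).
--     """
--     factors = []
--     for i in range(1, int(math.sqrt(n)) + 1):
--         if n % i == 0:
--             r = i
--             c = n // i
--             factors.append((r, c))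
--             if r != c:
--                 factors.append((c, r))
--
--     # Sort by abs(r-c) to prefer square shapes
--     factors.sort(key=lambda x: abs(x[0] - x[1]))
--     return factors
-- ===== SOURCE B (Python) =====
-- import math
--
-- def get_factor_pairs(n):
--     """Factor pairs (r, c) with r*c = n, most square first: iterate i downward
--     from isqrt(n); each divisor yields (i, n//i) then (n//i, i), already in
--     squareness order, so no final sort is needed."""
--     factors = []
--     for i in range(math.isqrt(n), 0, -1):
--         if n % i == 0:
--             factors.append((i, n // i))
--             if i != n // i:
--                 factors.append((n // i, i))
--     return factors
-- ===== Notes on version B (the rewrite author's own statement) =====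
-- stated objective: simpler
-- what changed: B iterates the divisor downward from isqrt(n) and emits (i, n//i) then (n//i, i) directly, which yields the list already in squareness order, so A's append-then-stable-sort pass disappears.
import Mathlib
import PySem

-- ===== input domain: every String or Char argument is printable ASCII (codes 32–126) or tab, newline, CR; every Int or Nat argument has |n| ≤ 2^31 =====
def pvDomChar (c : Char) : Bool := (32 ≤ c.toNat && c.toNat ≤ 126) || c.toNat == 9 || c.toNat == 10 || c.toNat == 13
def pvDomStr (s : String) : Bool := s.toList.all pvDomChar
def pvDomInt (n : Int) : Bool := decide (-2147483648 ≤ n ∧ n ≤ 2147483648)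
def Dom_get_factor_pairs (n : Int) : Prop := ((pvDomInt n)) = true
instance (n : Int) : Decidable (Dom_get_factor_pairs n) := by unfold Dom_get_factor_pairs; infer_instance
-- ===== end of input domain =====

-- B builds the factor-pair list directly in squareness order by iterating the divisor
-- downward from isqrt(n), so A's final stable sort disappears (objective: simpler).


-- ===== PORT A =====
-- int(math.sqrt(n)) is ported as Nat.sqrt n.toNat: exact for 0 ≤ n ≤ 2^31 (checked:
-- the double sqrt truncates to isqrt there); for n < 0 Python raises ValueError (Pre_).
def get_factor_pairs (n : Int) : List (Int × Int) :=
  let factors : List (Int × Int) :=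
    (PySem.List.pyRange 1 ((Nat.sqrt n.toNat : Int) + 1) 1).foldl
      (fun acc i =>
        if PySem.Int.mod n i = 0 then
          let r := i
          let c := PySem.Int.floordiv n i
          let acc := acc ++ [(r, c)]
          if r ≠ c then acc ++ [(c, r)] else acc
        else acc) []
  PySem.List.sorted factors (fun x => |x.1 - x.2|) false

-- ===== PORT B =====
-- Source B's 'for i in range(math.isqrt(n), 0, -1)' as structural recursion on i.
def pvAltLoop (n : Int) : Nat → List (Int × Int)
  | 0 => []
  | k + 1 =>
    let i : Int := ((k + 1 : Nat) : Int)
    (if PySem.Int.mod n i = 0 then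
       (i, PySem.Int.floordiv n i) ::
         (if i ≠ PySem.Int.floordiv n i then [(PySem.Int.floordiv n i, i)] else [])
     else []) ++ pvAltLoop n k

def get_factor_pairs_alt (n : Int) : List (Int × Int) :=
  pvAltLoop n (Nat.sqrt n.toNat)

-- ===== PRECONDITION & SPEC =====
-- Pre_ excludes exactly the negative inputs, where math.sqrt (and B's math.isqrt) raise ValueError.
def Pre_get_factor_pairs (n : Int) : Prop := 0 ≤ n
instance (n : Int) : Decidable (Pre_get_factor_pairs n) := by unfold Pre_get_factor_pairs; infer_instance
def pvWitness_get_factor_pairs : Int := 20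

def Spec_get_factor_pairs (n : Int) (out : List (Int × Int)) : Prop := out = get_factor_pairs_alt n
instance (n : Int) (out : List (Int × Int)) : Decidable (Spec_get_factor_pairs n out) := by unfold Spec_get_factor_pairs; infer_instance

-- ===== CLAIM (what is proved, stated in full; the proofs are below) =====
def Claim_equal_get_factor_pairs : Prop := ∀ (n : Int), Dom_get_factor_pairs n → Pre_get_factor_pairs n → Spec_get_factor_pairs n (get_factor_pairs n)

-- ===== LEMMAS AND PROOFS =====

-- the per-divisor block both programs emit
def pvBlock (n i : Int) : List (Int × Int) :=
  if PySem.Int.mod n i = 0 then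
    (i, PySem.Int.floordiv n i) ::
      (if i ≠ PySem.Int.floordiv n i then [(PySem.Int.floordiv n i, i)] else [])
  else []

lemma pvAltLoop_succ (n : Int) (k : Nat) :
    pvAltLoop n (k + 1) = pvBlock n ((k + 1 : Nat) : Int) ++ pvAltLoop n k := rfl

-- A's unsorted accumulator: blocks in ascending divisor order
def pvAscList (n : Int) : Nat → List (Int × Int)
  | 0 => []
  | k + 1 => pvAscList n k ++ pvBlock n ((k + 1 : Nat) : Int)

lemma pvA_foldl (n : Int) (k : Nat) :
    (PySem.List.pyRange 1 ((k : Int) + 1) 1).foldl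
      (fun acc i =>
        if PySem.Int.mod n i = 0 then
          let r := i
          let c := PySem.Int.floordiv n i
          let acc := acc ++ [(r, c)]
          if r ≠ c then acc ++ [(c, r)] else acc
        else acc) []
      = pvAscList n k := by
  induction k with
  | zero => simp [PySem.List.pyRange, pvAscList]
  | succ k ih =>
    have hb : ((k + 1 : Nat) : Int) + 1 = (((k : Nat) : Int) + 1) + 1 := by push_cast; ring
    rw [hb, PySem.List.pyRange_one_succ_right (by omega), List.foldl_append, ih]
    have he : (((k : Nat) : Int) + 1) = ((k + 1 : Nat) : Int) := by push_cast; ring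
    simp only [List.foldl_cons, List.foldl_nil, he]
    rw [show pvAscList n (k + 1) = pvAscList n k ++ pvBlock n ((k + 1 : Nat) : Int) from rfl]
    unfold pvBlock
    split_ifs with h1 h2
    · simp
    · simp
    · simp

-- every element of pvAltLoop n k comes from a divisor i ≤ k
lemma pvAltLoop_mem (n : Int) (k : Nat) {x : Int × Int} (hx : x ∈ pvAltLoop n k) :
    ∃ i : Nat, 1 ≤ i ∧ i ≤ k ∧
      (x = (((i : Nat) : Int), PySem.Int.floordiv n ((i : Nat) : Int)) ∨
       x = (PySem.Int.floordiv n ((i : Nat) : Int), ((i : Nat) : Int))) := by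
  induction k with
  | zero => simp [pvAltLoop] at hx
  | succ k ih =>
    rw [pvAltLoop_succ, List.mem_append] at hx
    rcases hx with hx | hx
    · refine ⟨k + 1, by omega, le_rfl, ?_⟩
      unfold pvBlock at hx
      split at hx
      · rcases List.mem_cons.mp hx with h | h
        · exact Or.inl h
        · split at h <;> simp_all
      · simp at hx
    · obtain ⟨i, h1, h2, h3⟩ := ih hx
      exact ⟨i, h1, by omega, h3⟩

-- one unfolding step of PySem's insertion
lemma pvInsertBy_cons {α : Type} (before : α → α → Bool) (x y : α) (ys : List α) :
    PySem.List.insertBy before x (y :: ys) =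
      if before x y = true then x :: y :: ys else y :: PySem.List.insertBy before x ys := rfl

-- inserting an element whose key is strictly below every key present goes to the front
lemma pvInsert_front {x : Int × Int} (acc : List (Int × Int))
    (h : ∀ y ∈ acc, |x.1 - x.2| < |y.1 - y.2|) :
    PySem.List.insertBy (fun a b => decide (|a.1 - a.2| < |b.1 - b.2|)) x acc = x :: acc := by
  cases acc with
  | nil => rfl
  | cons y ys => simp [pvInsertBy_cons, h y (List.mem_cons_self)]

-- the key of the (k+1)-block is strictly below every key occurring in pvAltLoop n k
lemma pvKey_lt (n : Int) (hn : 0 ≤ n) (k : Nat) (hk : k + 1 ≤ Nat.sqrt n.toNat)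
    (y : Int × Int) (hy : y ∈ pvAltLoop n k) :
    |(((k + 1 : Nat) : Int)) - PySem.Int.floordiv n ((k + 1 : Nat) : Int)| < |y.1 - y.2| := by
  obtain ⟨i, h1, h2, h3⟩ := pvAltLoop_mem n k hy
  have hn' : n = ((n.toNat : Nat) : Int) := (Int.toNat_of_nonneg hn).symm
  have hik : i ≤ Nat.sqrt n.toNat := by omega
  have hi2 : i * i ≤ n.toNat := Nat.le_sqrt.mp hik
  have hk2 : (k + 1) * (k + 1) ≤ n.toNat := Nat.le_sqrt.mp hk
  have hib : i ≤ n.toNat / i := (Nat.le_div_iff_mul_le (by omega)).mpr hi2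
  have hkb : k + 1 ≤ n.toNat / (k + 1) := (Nat.le_div_iff_mul_le (by omega)).mpr hk2
  have hmono : n.toNat / (k + 1) ≤ n.toNat / i := Nat.div_le_div_left (by omega) (by omega)
  have e1 : PySem.Int.floordiv n ((k + 1 : Nat) : Int) = ((n.toNat / (k + 1) : Nat) : Int) := by
    rw [hn', PySem.Int.floordiv_natCast]; simp
  have e2 : PySem.Int.floordiv n ((i : Nat) : Int) = ((n.toNat / i : Nat) : Int) := by
    rw [hn', PySem.Int.floordiv_natCast]; simp
  have hib' : ((i : Nat) : Int) ≤ ((n.toNat / i : Nat) : Int) := by exact_mod_cast hib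
  have hkb' : (((k + 1 : Nat) : Nat) : Int) ≤ ((n.toNat / (k + 1) : Nat) : Int) := by
    exact_mod_cast hkb
  have hmono' : ((n.toNat / (k + 1) : Nat) : Int) ≤ ((n.toNat / i : Nat) : Int) := by
    exact_mod_cast hmono
  have hi' : ((i : Nat) : Int) < (((k + 1 : Nat) : Nat) : Int) := by exact_mod_cast (by omega : i < k + 1)
  have hkey : |y.1 - y.2| = ((n.toNat / i : Nat) : Int) - ((i : Nat) : Int) := by
    rcases h3 with h3 | h3 <;> rw [h3, e2] <;> dsimp only
    · rw [abs_of_nonpos (by linarith)]; ring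
    · rw [abs_of_nonneg (by linarith)]
  rw [hkey, e1, abs_of_nonpos (by linarith)]
  linarith

-- the invariant: A's stable sort of the ascending block list is B's descending block list
theorem pv_main (n : Int) (hn : 0 ≤ n) (k : Nat) (hk : k ≤ Nat.sqrt n.toNat) :
    PySem.List.sorted (pvAscList n k) (fun x => |x.1 - x.2|) false = pvAltLoop n k := by
  induction k with
  | zero => rfl
  | succ k ih =>
    have ih' := ih (by omega)
    rw [PySem.List.sorted_eq_foldl_insertBy] at ih' ⊢
    have hsplit : pvAscList n (k + 1) = pvAscList n k ++ pvBlock n ((k + 1 : Nat) : Int) := rfl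
    rw [hsplit, List.foldl_append, ih', pvAltLoop_succ]
    unfold pvBlock
    split
    · rename_i hdvd
      have h1 : PySem.List.insertBy (fun a b => decide (|a.1 - a.2| < |b.1 - b.2|))
          (((k + 1 : Nat) : Int), PySem.Int.floordiv n ((k + 1 : Nat) : Int)) (pvAltLoop n k)
          = (((k + 1 : Nat) : Int), PySem.Int.floordiv n ((k + 1 : Nat) : Int)) :: pvAltLoop n k :=
        pvInsert_front (pvAltLoop n k) (fun y hy => pvKey_lt n hn k hk y hy)
      by_cases hne : ((k + 1 : Nat) : Int) ≠ PySem.Int.floordiv n ((k + 1 : Nat) : Int)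
      · have h2 : PySem.List.insertBy (fun a b => decide (|a.1 - a.2| < |b.1 - b.2|))
            (PySem.Int.floordiv n ((k + 1 : Nat) : Int), ((k + 1 : Nat) : Int)) (pvAltLoop n k)
            = (PySem.Int.floordiv n ((k + 1 : Nat) : Int), ((k + 1 : Nat) : Int)) :: pvAltLoop n k :=
          pvInsert_front (pvAltLoop n k) (fun y hy => by
            dsimp only
            rw [abs_sub_comm]
            exact pvKey_lt n hn k hk y hy)
        rw [if_pos hne]
        simp only [List.foldl_cons, List.foldl_nil]
        rw [h1, pvInsertBy_cons, if_neg (by simp [abs_sub_comm]), h2]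
        rfl
      · rw [if_neg hne]
        simp only [List.foldl_cons, List.foldl_nil]
        rw [h1]
        rfl
    · simp

-- ===== VERDICT (by name: the statement is the Claim_ definition above) =====
theorem get_factor_pairs_spec : Claim_equal_get_factor_pairs := by
  intro n hdom hpre
  unfold Spec_get_factor_pairs get_factor_pairs get_factor_pairs_alt
  rw [pvA_foldl]
  exact pv_main n hpre _ le_rfl
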